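-- pv_equiv track=rewrite | github.com/AnnaVorobyova1401/2019-2-level-labs | lab_3/main.py | split_by_sentence
-- ===== SOURCE A (Python) =====
-- def split_by_sentence(text: str) -> list:
--     result = []
--     if not isinstance(text, str):
--         return result
--     i = 0
--     end_of_text = len(text)
--     while i < end_of_text:
--         if not text[i].isupper():
--             i += 1
--             continue
--         t = i
--         while t < end_of_text and text[t] not in '.!?':
--             t += 1
--         if t < end_of_text and text[t] in '.!?':
--             temp_list = text[i: t].split('\n')
--             temp_str = ' '.join(temp_list)
--             sentence = [sym for sym in temp_str]
--             for num, sym in enumerate(sentence):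
--                 if sym.isupper():
--                     sentence[num] = sentence[num].lower()
--                 if sym in '!"#$%&()**+,./:;<=>?@[\'-]^_`\\\t{|}~':
--                     sentence[num] = 'DEL'
--                 if sym == ' ' and (sentence[num - 1] == ' ' or (num + 1) < len(sentence) and sentence[num + 1] == ' '):
--                     sentence[num] = 'DEL'
--             num = 0
--             while num < len(sentence):
--                 if sentence[num] == 'DEL':
--                     del sentence[num]
--                     continue
--                 num += 1
--             result += [['<s>'] + ''.join(sentence).split(' ') + ['</s>']]
--             i = t + 1
--         else:
--             i += 1
--     return result
-- ===== SOURCE B (Python) =====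
-- def split_by_sentence(text: str) -> list:
--     result = []
--     if not isinstance(text, str):
--         return result
--     punct = '!"#$%&()*+,./:;<=>?@[\'-]^_`\\\t{|}~'
--     n = len(text)
--     i = 0
--     while i < n:
--         if 'A' <= text[i] <= 'Z':
--             t = next((k for k in range(i, n) if text[k] in '.!?'), None)
--             if t is None:
--                 break
--             temp = text[i:t]
--             m = len(temp)
--             words = ''.join(
--                 ' ' if c in ' \n' else c.lower()
--                 for k, c in enumerate(temp)
--                 if c not in punct and not (c in ' \n' and k + 1 < m and temp[k + 1] in ' \n')
--             ).split(' ')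
--             result.append(['<s>'] + words + ['</s>'])
--             i = t + 1
--         else:
--             i += 1
--     return result
-- ===== Notes on version B (the rewrite author's own statement) =====
-- stated objective: alternative
-- what changed: B replaces A's restart-scan (which re-searches for a terminator from every uppercase letter) by a single forward pass that stops as soon as no sentence terminator remains, and replaces A's sentinel-mark-then-in-place-delete sentence cleaning by one lookahead filtering comprehension.
import Mathlib
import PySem

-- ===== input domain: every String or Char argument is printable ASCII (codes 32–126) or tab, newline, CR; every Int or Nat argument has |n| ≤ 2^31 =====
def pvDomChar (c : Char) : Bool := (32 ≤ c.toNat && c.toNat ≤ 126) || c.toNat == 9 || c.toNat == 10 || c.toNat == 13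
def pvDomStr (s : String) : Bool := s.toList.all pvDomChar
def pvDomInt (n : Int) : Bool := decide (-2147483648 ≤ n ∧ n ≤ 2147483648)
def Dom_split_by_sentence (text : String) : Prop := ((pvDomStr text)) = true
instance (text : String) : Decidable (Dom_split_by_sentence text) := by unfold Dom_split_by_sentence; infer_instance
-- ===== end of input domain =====

-- B is a single forward pass (stops when no terminator remains; cleans each sentence by one
-- lookahead comprehension) instead of A's restart-scan with sentinel-mark-then-delete cleaning.

-- ===== PORT A =====
-- the punctuation string literal of A (the '*' really occurs twice in A's literal)
def pvPunct : List Char := "!\"#$%&()**+,./:;<=>?@['-]^_`\\\t{|}~".toList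
def pvTerm : List Char := ['.', '!', '?']
def pvSing (c : Char) : List Char := [c]
def pvDEL : List Char := ['D', 'E', 'L']

-- Python str.isupper() (at least one cased char, all cased chars uppercase); exact on the ASCII domain
def pvStrIsupper (s : List Char) : Bool :=
  s.any PySem.Chars.isupper && s.all (fun c => !PySem.Chars.isalpha c || PySem.Chars.isupper c)

-- A's inner `while t < end_of_text and text[t] not in '.!?': t += 1`
-- (fuel makes the recursion structural; cs.length - t fuel is always enough)
def pvFindTermA (cs : List Char) : Nat → Nat → Nat
  | 0, t => t
  | fuel + 1, t =>
    if t < cs.length then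
      if cs.getD t ' ' ∈ pvTerm then t else pvFindTermA cs fuel (t + 1)
    else t

-- one iteration of A's `for num, sym in enumerate(sentence)` body (in-place sets on the list)
def pvMarkStep (s : List (List Char)) (num : Nat) : List (List Char) :=
  let sym := s.getD num []
  let s1 := if pvStrIsupper sym then s.set num (PySem.Chars.lower sym) else s
  let s2 := if PySem.Chars.isIn sym pvPunct then s1.set num pvDEL else s1
  if sym == [' '] && ((PySem.List.pyGet? s2 ((num : Int) - 1) == some [' ']) ||
      (decide (num + 1 < s2.length) && (s2.getD (num + 1) [] == [' ']))) then
    s2.set num pvDEL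
  else s2

def pvMark : List (List Char) → Nat → Nat → List (List Char)
  | s, 0, _ => s
  | s, fuel + 1, num => if num < s.length then pvMark (pvMarkStep s num) fuel (num + 1) else s

-- A's `while num < len(sentence): if sentence[num] == 'DEL': del sentence[num] ... else num += 1`
def pvDelLoop : List (List Char) → Nat → Nat → List (List Char)
  | s, 0, _ => s
  | s, fuel + 1, num =>
    if num < s.length then
      if s.getD num [] == pvDEL then pvDelLoop (s.eraseIdx num) fuel num
      else pvDelLoop s fuel (num + 1)
    else s

-- A's sentence-processing block for the found span [i, t)
def pvSentenceA (cs : List Char) (i t : Nat) : List String :=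
  let sub := PySem.List.slice cs (some (i : Int)) (some (t : Int))
  let temp_str := PySem.Chars.join [' '] (PySem.Chars.splitOn sub ['\n'])
  let marked := pvMark (temp_str.map pvSing) (temp_str.map pvSing).length 0
  let sentence := pvDelLoop marked marked.length 0
  ["<s>"] ++ (PySem.Chars.splitOn (PySem.Chars.join [] sentence) [' ']).map String.ofList ++ ["</s>"]

-- A's outer `while i < end_of_text` loop, with `result` accumulated (i strictly grows, so
-- cs.length + 1 fuel is always enough)
def pvLoopA (cs : List Char) : Nat → Nat → List (List String) → List (List String)
  | 0, _, result => result
  | fuel + 1, i, result =>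
    if i < cs.length then
      if !PySem.Chars.isupper (cs.getD i ' ') then pvLoopA cs fuel (i + 1) result
      else
        if pvFindTermA cs (cs.length - i) i < cs.length ∧
            cs.getD (pvFindTermA cs (cs.length - i) i) ' ' ∈ pvTerm then
          pvLoopA cs fuel (pvFindTermA cs (cs.length - i) i + 1)
            (result ++ [pvSentenceA cs i (pvFindTermA cs (cs.length - i) i)])
        else pvLoopA cs fuel (i + 1) result
    else result

-- the isinstance(text, str) guard is always True for a String argument
def split_by_sentence (text : String) : List (List String) :=
  pvLoopA text.toList (text.toList.length + 1) 0 []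

-- ===== PORT B =====
-- B's punctuation literal (single '*')
def pvPunctB : List Char := "!\"#$%&()*+,./:;<=>?@['-]^_`\\\t{|}~".toList
-- `c in ' \n'`
def pvSpaceLike (c : Char) : Bool := c == ' ' || c == '\n'

-- B's `next((k for k in range(i, n) if text[k] in '.!?'), None)` (fuel again structural)
def pvNextTerm (cs : List Char) : Nat → Nat → Option Nat
  | 0, _ => none
  | fuel + 1, k =>
    if k < cs.length then
      if cs.getD k ' ' ∈ pvTerm then some k else pvNextTerm cs fuel (k + 1)
    else none

-- B's lookahead filtering comprehension over enumerate(temp)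
def pvCleanB (temp : List Char) : List Char :=
  temp.zipIdx.filterMap (fun p =>
    if !pvPunctB.contains p.1 &&
        !(pvSpaceLike p.1 && decide (p.2 + 1 < temp.length) && pvSpaceLike (temp.getD (p.2 + 1) ' ')) then
      some (if pvSpaceLike p.1 then ' ' else PySem.Chars.lowerChar p.1)
    else none)

def pvSentenceB (cs : List Char) (i t : Nat) : List String :=
  let temp := PySem.List.slice cs (some (i : Int)) (some (t : Int))
  ["<s>"] ++ (PySem.Chars.splitOn (pvCleanB temp) [' ']).map String.ofList ++ ["</s>"]

-- B's outer `while i < n` loop (i strictly grows, so cs.length + 1 fuel is always enough)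
def pvLoopB (cs : List Char) : Nat → Nat → List (List String) → List (List String)
  | 0, _, result => result
  | fuel + 1, i, result =>
    if i < cs.length then
      if 'A' ≤ cs.getD i ' ' ∧ cs.getD i ' ' ≤ 'Z' then
        match pvNextTerm cs (cs.length - i) i with
        | none => result
        | some t => pvLoopB cs fuel (t + 1) (result ++ [pvSentenceB cs i t])
      else pvLoopB cs fuel (i + 1) result
    else result

def split_by_sentence_alt (text : String) : List (List String) :=
  pvLoopB text.toList (text.toList.length + 1) 0 []

-- ===== PRECONDITION & SPEC =====
def Spec_split_by_sentence (text : String) (out : List (List String)) : Prop := out = split_by_sentence_alt text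
instance (text : String) (out : List (List String)) : Decidable (Spec_split_by_sentence text out) := by unfold Spec_split_by_sentence; infer_instance

-- ===== CLAIM (what is proved, stated in full; the proofs are below) =====
def Claim_equal_split_by_sentence : Prop := ∀ (text : String), Dom_split_by_sentence text → Spec_split_by_sentence text (split_by_sentence text)

-- ===== LEMMAS AND PROOFS =====

-- ---- helper definitions used only by the proofs ----

def pvConv (c : Char) : Char := if c = '\n' then ' ' else c

def pvMySplit (a : Char) : List Char → List Char → List (List Char)
  | [], cur => [cur.reverse]
  | c :: rest, cur => if c = a then cur.reverse :: pvMySplit a rest [] else pvMySplit a rest (c :: cur)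

def pvKeepA (c : Char) (nxt : Option Char) : Option Char :=
  if PySem.Chars.isupper c then some (PySem.Chars.lowerChar c)
  else if pvPunct.contains c then none
  else if c = ' ' ∧ nxt = some ' ' then none
  else some c

def pvVal (c : Char) (nxt : Option Char) : List Char := (pvKeepA c nxt).elim pvDEL pvSing

def pvSpec : List Char → List (List Char)
  | [] => []
  | c :: rest => pvVal c rest.head? :: pvSpec rest

def pvSpecFA : List Char → List Char
  | [] => []
  | c :: rest => (pvKeepA c rest.head?).toList ++ pvSpecFA rest

def pvKeepB (c : Char) (nxt : Option Char) : Option Char :=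
  if pvPunctB.contains c then none
  else if pvSpaceLike c && nxt.elim false pvSpaceLike then none
  else some (if pvSpaceLike c then ' ' else PySem.Chars.lowerChar c)

def pvSpecFB : List Char → List Char
  | [] => []
  | c :: rest => (pvKeepB c rest.head?).toList ++ pvSpecFB rest

-- ---- generic small facts ----

theorem pvSetMid {α : Type} (A B : List α) (x v : α) :
    (A ++ x :: B).set A.length v = A ++ v :: B := by
  induction A with
  | nil => rfl
  | cons a A ih => simp [List.set, ih]

theorem pvIsIn_singleton (c : Char) (l : List Char) :
    PySem.Chars.isIn [c] l = l.contains c := by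
  by_cases hm : c ∈ l
  · rw [(PySem.Chars.isIn_iff_infix [c] l).mpr ((List.singleton_infix_iff c l).mpr hm)]
    simp [hm]
  · rw [(PySem.Chars.isIn_eq_false_iff [c] l).mpr
      (fun hinf => hm ((List.singleton_infix_iff c l).mp hinf))]
    simp [hm]

theorem pvStrIsupper_singleton (c : Char) : pvStrIsupper [c] = PySem.Chars.isupper c := by
  simp only [pvStrIsupper, List.any_cons, List.any_nil, List.all_cons, List.all_nil,
    Bool.or_false, Bool.and_true, PySem.Chars.isalpha]
  cases h : PySem.Chars.isupper c <;> simp [h]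

-- ---- character-class facts ----

theorem pvUpperBounds (c : Char) (h : PySem.Chars.isupper c = true) :
    65 ≤ c.toNat ∧ c.toNat ≤ 90 := by
  simp only [PySem.Chars.isupper, Bool.and_eq_true, decide_eq_true_eq, Char.le_def,
    UInt32.le_iff_toNat_le] at h
  exact h

theorem pvLowerChar_ne_space (c : Char) (h : PySem.Chars.isupper c = true) :
    PySem.Chars.lowerChar c ≠ ' ' := by
  obtain ⟨h1, h2⟩ := pvUpperBounds c h
  simp only [PySem.Chars.lowerChar, h, if_true]
  intro heq
  have h3 := congrArg Char.toNat heq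
  have hsp : (' ' : Char).toNat = 32 := by decide
  rw [Char.toNat_ofNat, hsp] at h3
  have hv : (c.toNat + 32).isValidChar := Or.inl (by omega)
  rw [if_pos hv] at h3
  omega

theorem pvLowerChar_of_not_upper (c : Char) (h : PySem.Chars.isupper c = false) :
    PySem.Chars.lowerChar c = c := by
  simp [PySem.Chars.lowerChar, h]

theorem pvUpper_ne_space (c : Char) (h : PySem.Chars.isupper c = true) : c ≠ ' ' := by
  intro rfl_eq; subst rfl_eq; simp [PySem.Chars.isupper] at h

theorem pvUpper_ne_newline (c : Char) (h : PySem.Chars.isupper c = true) : c ≠ '\n' := by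
  intro rfl_eq; subst rfl_eq; simp [PySem.Chars.isupper] at h

theorem pvUpper_not_punct (c : Char) (h : PySem.Chars.isupper c = true) :
    c ∉ pvPunct := by
  intro hm
  obtain ⟨h1, h2⟩ := pvUpperBounds c h
  have hall : pvPunct.all (fun d => decide (d.toNat < 65 ∨ 90 < d.toNat)) = true := by decide
  have := List.all_eq_true.mp hall c hm
  simp at this
  omega

theorem pvUpper_not_term (c : Char) (h : PySem.Chars.isupper c = true) : c ∉ pvTerm := by
  intro hm
  obtain ⟨h1, h2⟩ := pvUpperBounds c h
  have hall : pvTerm.all (fun d => decide (d.toNat < 65 ∨ 90 < d.toNat)) = true := by decide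
  have := List.all_eq_true.mp hall c hm
  simp at this
  omega

theorem pvPunct_mem_iff (c : Char) : c ∈ pvPunctB ↔ c ∈ pvPunct := by
  constructor <;> intro h <;> (simp [pvPunct, pvPunctB] at h ⊢; tauto)

theorem pvSpaceLike_iff (c : Char) : pvSpaceLike c = true ↔ pvConv c = ' ' := by
  by_cases h1 : c = '\n'
  · subst h1; simp [pvSpaceLike, pvConv]
  · by_cases h2 : c = ' ' <;> simp [pvSpaceLike, pvConv, h1, h2]

-- ---- the A-side temp string:  ' '.join(s.split('\n'))  maps '\n' to ' ' ----

theorem pvSplitOnGo (a : Char) (fuel : Nat) (s cur : List Char) (acc : List (List Char))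
    (hf : s.length ≤ fuel) :
    PySem.Chars.splitOn.go [a] fuel s cur acc = acc.reverse ++ pvMySplit a s cur := by
  induction fuel generalizing s cur acc with
  | zero =>
    have hs : s = [] := List.length_eq_zero_iff.mp (by omega)
    subst hs
    simp [PySem.Chars.splitOn.go, pvMySplit]
  | succ fuel ih =>
    cases s with
    | nil => simp [PySem.Chars.splitOn.go, pvMySplit]
    | cons c rest =>
      rw [PySem.Chars.splitOn.go]
      have hrest : rest.length ≤ fuel := by simp at hf; omega
      have hpre : [a].isPrefixOf (c :: rest) = (a == c) := by simp [List.isPrefixOf]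
      rw [hpre]
      by_cases hac : a = c
      · rw [if_pos (by simp [hac])]
        have hdrop : List.drop [a].length (c :: rest) = rest := by simp
        rw [hdrop, ih rest [] (cur.reverse :: acc) hrest]
        simp [pvMySplit, hac.symm]
      · rw [if_neg (by simp [hac])]
        rw [ih rest (c :: cur) acc hrest]
        rw [pvMySplit, if_neg (fun h => hac h.symm)]

theorem pvSplitOn_eq (a : Char) (s : List Char) :
    PySem.Chars.splitOn s [a] = pvMySplit a s [] := by
  unfold PySem.Chars.splitOn
  rw [pvSplitOnGo a (s.length + 1) s [] [] (by omega)]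
  rfl

theorem pvMySplit_ne_nil (a : Char) (s cur : List Char) : pvMySplit a s cur ≠ [] := by
  induction s generalizing cur with
  | nil => simp [pvMySplit]
  | cons c rest ih =>
    by_cases h : c = a <;> simp [pvMySplit, h] <;> exact ih _

theorem pvJoin_mySplit (a b : Char) (s cur : List Char) :
    PySem.Chars.join [b] (pvMySplit a s cur) =
      cur.reverse ++ s.map (fun c => if c = a then b else c) := by
  induction s generalizing cur with
  | nil => simp [pvMySplit, PySem.Chars.join_singleton]
  | cons c rest ih =>
    by_cases h : c = a
    · rw [pvMySplit, if_pos h]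
      cases hms : pvMySplit a rest [] with
      | nil => exact absurd hms (pvMySplit_ne_nil a rest [])
      | cons p ps =>
        rw [PySem.Chars.join_cons_cons, ← hms, ih []]
        simp [h]
    · rw [pvMySplit, if_neg h, ih (c :: cur)]
      simp [h]

theorem pvTempEq (s : List Char) :
    PySem.Chars.join [' '] (PySem.Chars.splitOn s ['\n']) = s.map pvConv := by
  rw [pvSplitOn_eq, pvJoin_mySplit]
  rfl

-- ---- the del loop is a filter ----

theorem pvDelLoop_eq (fuel : Nat) (s : List (List Char)) (num : Nat)
    (hf : s.length ≤ num + fuel) :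
    pvDelLoop s fuel num = s.take num ++ (s.drop num).filter (fun x => !(x == pvDEL)) := by
  induction fuel generalizing s num with
  | zero =>
    have hle : s.length ≤ num := by omega
    rw [pvDelLoop, List.take_of_length_le hle, List.drop_of_length_le hle]
    simp
  | succ fuel ih =>
    rw [pvDelLoop]
    split_ifs with h1 h2
    · rw [ih (s.eraseIdx num) num (by rw [List.length_eraseIdx_of_lt h1]; omega),
        List.eraseIdx_eq_take_drop_succ]
      have htk : (s.take num).length = num := by simp; omega
      rw [List.take_left' htk, List.drop_left' htk]
      rw [List.drop_eq_getElem_cons h1]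
      have hv : s[num] = pvDEL := by
        have := (beq_iff_eq).mp h2
        rwa [List.getD_eq_getElem s [] h1] at this
      simp [hv]
    · rw [ih s (num + 1) (by omega)]
      have hv : ¬ (s[num] = pvDEL) := by
        intro hc
        exact h2 (beq_iff_eq.mpr (by rwa [List.getD_eq_getElem s [] h1]))
      have hvb : (s[num] == pvDEL) = false := by simpa using hv
      conv_rhs => rw [List.drop_eq_getElem_cons h1]
      rw [List.filter_cons, hvb]
      have htk1 : List.take (num + 1) s = List.take num s ++ [s[num]] := by
        rw [List.take_succ, List.getElem?_eq_getElem h1]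
        rfl
      rw [htk1, List.append_assoc]
      rfl
    · have hle : s.length ≤ num := by omega
      rw [List.take_of_length_le hle, List.drop_of_length_le hle]
      simp

-- ---- the mark loop computes pvSpec ----

theorem pvSpec_length (l : List Char) : (pvSpec l).length = l.length := by
  induction l with
  | nil => rfl
  | cons c rest ih => simp [pvSpec, ih]

theorem pvSpec_getElem? (l : List Char) (n : Nat) (h : n < l.length) :
    (pvSpec l)[n]? = some (pvVal (l[n]'h) l[n + 1]?) := by
  induction l generalizing n with
  | nil => simp at h
  | cons c rest ih =>
    cases n with
    | zero => simp [pvSpec, List.head?_eq_getElem?]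
    | succ m => simpa [pvSpec] using ih m (by simpa using h)

theorem pvVal_ne_spaceSing (d : Char) : pvVal d (some ' ') ≠ [' '] := by
  unfold pvVal pvKeepA
  split_ifs with h1 h2 h3
  · simp [pvSing]
    exact fun hh => pvLowerChar_ne_space d h1 hh
  · simp [pvDEL]
  · simp [pvDEL]
  · have hd : d ≠ ' ' := fun hh => h3 ⟨hh, rfl⟩
    simp [pvSing, hd]

theorem pvMarkStep_spec (temp : List Char) (num : Nat) (hn : num < temp.length)
    (h0 : ∀ (h : 0 < temp.length), PySem.Chars.isupper (temp[0]'h) = true) :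
    pvMarkStep ((pvSpec temp).take num ++ (temp.drop num).map pvSing) num =
      (pvSpec temp).take (num + 1) ++ (temp.drop (num + 1)).map pvSing := by
  have htake : ((pvSpec temp).take num).length = num := by
    simp [pvSpec_length]
    omega
  have hdropc : temp.drop num = (temp[num]'hn) :: temp.drop (num + 1) :=
    List.drop_eq_getElem_cons hn
  have hshape : (pvSpec temp).take num ++ (temp.drop num).map pvSing
      = (pvSpec temp).take num ++ pvSing (temp[num]'hn) :: (temp.drop (num + 1)).map pvSing := by
    rw [hdropc]
    rfl
  have hsym : ((pvSpec temp).take num ++ (temp.drop num).map pvSing).getD num []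
      = pvSing (temp[num]'hn) := by
    rw [hshape, List.getD_eq_getElem?_getD, List.getElem?_append_right (by omega), htake,
      Nat.sub_self]
    rfl
  have hset : ∀ v, ((pvSpec temp).take num ++ (temp.drop num).map pvSing).set num v
      = (pvSpec temp).take num ++ v :: (temp.drop (num + 1)).map pvSing := by
    intro v
    have hmid := pvSetMid ((pvSpec temp).take num) ((temp.drop (num + 1)).map pvSing)
      (pvSing (temp[num]'hn)) v
    rw [htake] at hmid
    rw [hshape, hmid]
  have hlen : ((pvSpec temp).take num ++ (temp.drop num).map pvSing).length = temp.length := by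
    simp [pvSpec_length]
    omega
  have hgoal : (pvSpec temp).take (num + 1) ++ (temp.drop (num + 1)).map pvSing
      = (pvSpec temp).take num ++ pvVal (temp[num]'hn) temp[num + 1]?
          :: (temp.drop (num + 1)).map pvSing := by
    rw [List.take_succ, pvSpec_getElem? temp num hn]
    simp
  rw [hgoal]
  simp only [pvMarkStep]
  rw [hsym]
  have hSu : pvStrIsupper (pvSing (temp[num]'hn)) = PySem.Chars.isupper (temp[num]'hn) :=
    pvStrIsupper_singleton _
  have hSin : PySem.Chars.isIn (pvSing (temp[num]'hn)) pvPunct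
      = pvPunct.contains (temp[num]'hn) := pvIsIn_singleton _ _
  rw [hSu, hSin]
  by_cases hu : PySem.Chars.isupper (temp[num]'hn) = true
  · have hpc : pvPunct.contains (temp[num]'hn) = false := by
      simpa using pvUpper_not_punct _ hu
    have hlow : PySem.Chars.lower (pvSing (temp[num]'hn))
        = [PySem.Chars.lowerChar (temp[num]'hn)] := rfl
    have hspc : (pvSing (temp[num]'hn) == [' ']) = false := by
      apply beq_eq_false_iff_ne.mpr
      intro h
      exact pvUpper_ne_space _ hu (by simpa [pvSing] using h)
    have hval : pvVal (temp[num]'hn) temp[num + 1]? = [PySem.Chars.lowerChar (temp[num]'hn)] := by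
      simp [pvVal, pvKeepA, hu, pvSing]
    simp only [hu, hpc, hlow, hspc, eq_self_iff_true, if_true, Bool.false_eq_true, if_false,
      Bool.false_and]
    rw [hset, hval]
  · have huB : PySem.Chars.isupper (temp[num]'hn) = false := by simpa using hu
    by_cases hpmem : pvPunct.contains (temp[num]'hn) = true
    · have hpm : (temp[num]'hn) ∈ pvPunct := by simpa using hpmem
      have hcne : (temp[num]'hn) ≠ ' ' := by
        intro he
        rw [he] at hpm
        exact absurd hpm (by decide)
      have hspc : (pvSing (temp[num]'hn) == [' ']) = false := by
        apply beq_eq_false_iff_ne.mpr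
        intro h
        exact hcne (by simpa [pvSing] using h)
      have hval : pvVal (temp[num]'hn) temp[num + 1]? = pvDEL := by
        simp [pvVal, pvKeepA, hu, hpm]
      simp only [huB, hpmem, hspc, eq_self_iff_true, if_true, Bool.false_eq_true, if_false,
        Bool.false_and]
      rw [hset, hval]
    · have hpf : pvPunct.contains (temp[num]'hn) = false := by simpa using hpmem
      have hpnm : (temp[num]'hn) ∉ pvPunct := by simpa using hpf
      by_cases hsp2 : (temp[num]'hn) = ' '
      · have hnum0 : 0 < num := by
          rcases Nat.eq_zero_or_pos num with h0' | h0'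
          · exfalso
            subst h0'
            have hupp := h0 (by omega)
            rw [hsp2] at hupp
            exact absurd hupp (by decide)
          · exact h0'
        have hspc : (pvSing (temp[num]'hn) == [' ']) = true := beq_iff_eq.mpr (by rw [hsp2]; simp [pvSing])
        have hidx : ((num : Int) - 1) = ((num - 1 : Nat) : Int) := by omega
        have hprev : PySem.List.pyGet?
            ((pvSpec temp).take num ++ (temp.drop num).map pvSing) ((num : Int) - 1)
            = some (pvVal (temp[num - 1]'(by omega)) temp[num]?) := by
          rw [hidx, PySem.List.pyGet?_natCast]
          have h1 : num - 1 < ((pvSpec temp).take num).length := by rw [htake]; omega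
          rw [List.getElem?_append_left h1, List.getElem?_take, if_pos (by omega)]
          have hsg := pvSpec_getElem? temp (num - 1) (by omega)
          rw [show num - 1 + 1 = num from by omega] at hsg
          exact hsg
        have hnn : temp[num]? = some ' ' := by rw [List.getElem?_eq_getElem hn, hsp2]
        have hprev_ne : (PySem.List.pyGet?
            ((pvSpec temp).take num ++ (temp.drop num).map pvSing) ((num : Int) - 1)
            == some [' ']) = false := by
          rw [hprev, hnn]
          have := pvVal_ne_spaceSing (temp[num - 1]'(by omega))
          simpa using this
        simp only [huB, hpf, Bool.false_eq_true, if_false]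
        rw [hspc, hprev_ne, hlen]
        simp only [Bool.true_and, Bool.false_or]
        by_cases hnl : num + 1 < temp.length
        · have hdec : decide (num + 1 < temp.length) = true := by simp [hnl]
          have hsuf : ((pvSpec temp).take num ++ (temp.drop num).map pvSing).getD (num + 1) []
              = pvSing (temp[num + 1]'hnl) := by
            rw [List.getD_eq_getElem?_getD, List.getElem?_append_right (by rw [htake]; omega),
              htake, show num + 1 - num = 1 from by omega]
            simp [List.getElem?_drop, List.getElem?_eq_getElem hnl]
          rw [hdec, hsuf]
          by_cases hnx : temp[num + 1]'hnl = ' '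
          · have hbeq : (pvSing (temp[num + 1]'hnl) == [' ']) = true :=
              beq_iff_eq.mpr (by rw [hnx]; simp [pvSing])
            rw [hbeq]
            simp only [Bool.true_and, eq_self_iff_true, if_true]
            have hval : pvVal (temp[num]'hn) temp[num + 1]? = pvDEL := by
              have hs1 : temp[num + 1]? = some ' ' := by rw [List.getElem?_eq_getElem hnl, hnx]
              simp [pvVal, pvKeepA, hu, hpnm, hsp2, hs1, show PySem.Chars.isupper ' ' = false from by decide]
            rw [hset, hval]
          · have hbeq : (pvSing (temp[num + 1]'hnl) == [' ']) = false := by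
              apply beq_eq_false_iff_ne.mpr
              intro h
              exact hnx (by simpa [pvSing] using h)
            rw [hbeq]
            simp only [Bool.and_false, Bool.false_eq_true, if_false]
            have hval : pvVal (temp[num]'hn) temp[num + 1]? = pvSing (temp[num]'hn) := by
              have hs1 : temp[num + 1]? = some (temp[num + 1]'hnl) := List.getElem?_eq_getElem hnl
              simp [pvVal, pvKeepA, hu, hpnm, hsp2, hs1, hnx, pvSing,
                show PySem.Chars.isupper ' ' = false from by decide,
                show (' ' : Char) ∉ pvPunct from by decide]
            rw [hval]
            exact hshape
        · have hdec : decide (num + 1 < temp.length) = false := by simp [hnl]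
          rw [hdec]
          simp only [Bool.false_and, Bool.false_eq_true, if_false]
          have hval : pvVal (temp[num]'hn) temp[num + 1]? = pvSing (temp[num]'hn) := by
            have hnone : temp[num + 1]? = none := List.getElem?_eq_none (by omega)
            simp [pvVal, pvKeepA, hu, hpnm, hsp2, hnone, pvSing,
              show PySem.Chars.isupper ' ' = false from by decide,
              show (' ' : Char) ∉ pvPunct from by decide]
          rw [hval]
          exact hshape
      · have hspc : (pvSing (temp[num]'hn) == [' ']) = false := by
          apply beq_eq_false_iff_ne.mpr
          intro h
          exact hsp2 (by simpa [pvSing] using h)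
        simp only [huB, hpf, Bool.false_eq_true, if_false]
        rw [hspc]
        simp only [Bool.false_and, Bool.false_eq_true, if_false]
        have hval : pvVal (temp[num]'hn) temp[num + 1]? = pvSing (temp[num]'hn) := by
          simp [pvVal, pvKeepA, hu, hpnm, hsp2, pvSing]
        rw [hval]
        exact hshape

theorem pvMark_go (temp : List Char)
    (h0 : ∀ (h : 0 < temp.length), PySem.Chars.isupper (temp[0]'h) = true) :
    ∀ (fuel num : Nat), temp.length ≤ num + fuel →
    pvMark ((pvSpec temp).take num ++ (temp.drop num).map pvSing) fuel num = pvSpec temp := by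
  intro fuel
  induction fuel with
  | zero =>
    intro num hn
    rw [pvMark]
    rw [List.take_of_length_le (by rw [pvSpec_length]; omega),
      List.drop_of_length_le (by omega)]
    simp
  | succ fuel ih =>
    intro num hn
    rw [pvMark]
    have hlen : ((pvSpec temp).take num ++ (temp.drop num).map pvSing).length = temp.length := by
      simp [pvSpec_length]
      omega
    by_cases h : num < temp.length
    · rw [if_pos (by omega)]
      rw [pvMarkStep_spec temp num h h0]
      exact ih (num + 1) (by omega)
    · rw [if_neg (by omega)]
      rw [List.take_of_length_le (by rw [pvSpec_length]; omega),
        List.drop_of_length_le (by omega)]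
      simp

-- ---- filtered mark spec = A-side char filter ----

theorem pvFilter_pvSpec (l : List Char) :
    (pvSpec l).filter (fun x => !(x == pvDEL)) = (pvSpecFA l).map pvSing := by
  induction l with
  | nil => rfl
  | cons c rest ih =>
    simp only [pvSpec, pvSpecFA, List.filter_cons, List.map_append]
    cases hk : pvKeepA c rest.head? with
    | none => simpa [pvVal, hk, pvDEL] using ih
    | some d => simpa [pvVal, hk, pvSing, pvDEL] using ih

-- ---- B's comprehension = B-side char filter ----

theorem pvCleanB_go (temp suf : List Char) (off : Nat) (hs : temp.drop off = suf) :
    (suf.zipIdx off).filterMap (fun p =>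
      if !pvPunctB.contains p.1 &&
          !(pvSpaceLike p.1 && decide (p.2 + 1 < temp.length) && pvSpaceLike (temp.getD (p.2 + 1) ' ')) then
        some (if pvSpaceLike p.1 then ' ' else PySem.Chars.lowerChar p.1)
      else none) = pvSpecFB suf := by
  induction suf generalizing off with
  | nil => simp [pvSpecFB]
  | cons c rest ih =>
    have hlen : off + (c :: rest).length = temp.length := by
      have h := congrArg List.length hs
      rw [List.length_drop] at h
      simp only [List.length_cons] at h ⊢
      omega
    have hdrop1 : temp.drop (off + 1) = rest := by
      rw [← List.tail_drop, hs]
      rfl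
    rw [List.zipIdx_cons, List.filterMap_cons]
    have hcond : (if !pvPunctB.contains c &&
          !(pvSpaceLike c && decide (off + 1 < temp.length) && pvSpaceLike (temp.getD (off + 1) ' ')) then
        some (if pvSpaceLike c then ' ' else PySem.Chars.lowerChar c)
      else none) = pvKeepB c rest.head? := by
      by_cases hpb : c ∈ pvPunctB
      · simp [pvKeepB, hpb]
      · by_cases hsl : pvSpaceLike c = true
        · cases rest with
          | nil =>
            have hnl : ¬ (off + 1 < temp.length) := by
              simp only [List.length_cons, List.length_nil] at hlen
              omega
            simp [pvKeepB, hpb, hsl, hnl]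
          | cons d r2 =>
            have hlt : off + 1 < temp.length := by simp only [List.length_cons] at hlen; omega
            have hget : temp[off + 1]? = some d := by
              have h0 : (temp.drop (off + 1))[0]? = some d := by rw [hdrop1]; rfl
              rwa [List.getElem?_drop, Nat.add_zero] at h0
            have hgetE : temp[off + 1]'hlt = d :=
              Option.some.inj ((List.getElem?_eq_getElem hlt).symm.trans hget)
            by_cases hd : pvSpaceLike d = true <;>
              simp [pvKeepB, hpb, hsl, hlt, hget, hgetE, hd]
        · simp [pvKeepB, hpb, hsl]
    rw [hcond]
    have htail := ih (off + 1) hdrop1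
    have hsf : pvSpecFB (c :: rest) = (pvKeepB c rest.head?).toList ++ pvSpecFB rest := rfl
    rw [hsf]
    cases hk : pvKeepB c rest.head? <;> simpa using htail

theorem pvCleanB_eq (temp : List Char) : pvCleanB temp = pvSpecFB temp := by
  unfold pvCleanB
  exact pvCleanB_go temp temp 0 rfl

-- ---- B-side filter = A-side filter after '\n' -> ' ' conversion ----

theorem pvKeepB_eq (c : Char) (nxt : Option Char) :
    pvKeepB c nxt = pvKeepA (pvConv c) (nxt.map pvConv) := by
  have hA : PySem.Chars.isupper ' ' = false := by decide
  have hP : (' ' : Char) ∉ pvPunct := by decide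
  by_cases hsp : pvSpaceLike c = true
  · have hconv : pvConv c = ' ' := (pvSpaceLike_iff c).mp hsp
    have hcc : c = ' ' ∨ c = '\n' := by simpa [pvSpaceLike] using hsp
    have hpunB : c ∉ pvPunctB := by rcases hcc with rfl | rfl <;> decide
    cases nxt with
    | none => simp [pvKeepB, pvKeepA, hconv, hpunB, hA, hP, hsp]
    | some d =>
      by_cases hh : pvSpaceLike d = true
      · simp [pvKeepB, pvKeepA, hconv, hpunB, hA, hP, hsp, hh, (pvSpaceLike_iff d).mp hh]
      · have hne : pvConv d ≠ ' ' := fun e => hh ((pvSpaceLike_iff d).mpr e)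
        simp [pvKeepB, pvKeepA, hconv, hpunB, hA, hP, hsp, hh, hne]
  · have hcsp : c ≠ ' ' := fun e => hsp (by rw [e]; decide)
    have hcnl : c ≠ '\n' := fun e => hsp (by rw [e]; decide)
    have hconv : pvConv c = c := by rw [pvConv, if_neg hcnl]
    by_cases hu : PySem.Chars.isupper c = true
    · have hpc : c ∉ pvPunct := pvUpper_not_punct c hu
      have hpb : c ∉ pvPunctB := fun h => hpc ((pvPunct_mem_iff c).mp h)
      simp [pvKeepB, pvKeepA, hconv, hu, hpc, hpb, hsp]
    · by_cases hpc : c ∈ pvPunct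
      · have hpb : c ∈ pvPunctB := (pvPunct_mem_iff c).mpr hpc
        simp [pvKeepB, pvKeepA, hconv, hu, hpc, hpb]
      · have hpb : c ∉ pvPunctB := fun h => hpc ((pvPunct_mem_iff c).mp h)
        simp [pvKeepB, pvKeepA, hconv, hu, hpc, hpb, hsp, hcsp,
          pvLowerChar_of_not_upper c (by simpa using hu)]

theorem pvSpecFB_eq (l : List Char) : pvSpecFB l = pvSpecFA (l.map pvConv) := by
  induction l with
  | nil => rfl
  | cons c rest ih =>
    simp only [pvSpecFB, List.map_cons, pvSpecFA, ih]
    congr 1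
    rw [pvKeepB_eq]
    congr 1
    cases rest <;> simp

-- ---- sentence equality ----

theorem pvSentence_eq (cs : List Char) (i t : Nat) (hit : i < t) (htl : t ≤ cs.length)
    (hu : PySem.Chars.isupper (cs.getD i ' ') = true) :
    pvSentenceA cs i t = pvSentenceB cs i t := by
  have hilen : i < cs.length := lt_of_lt_of_le hit htl
  simp only [pvSentenceA, pvSentenceB, PySem.List.slice_natCast]
  set sub := List.take (t - i) (List.drop i cs) with hsub
  have hcu : PySem.Chars.isupper (cs[i]'hilen) = true := by
    rwa [List.getD_eq_getElem cs ' ' hilen] at hu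
  have hsub0 : sub[0]? = some (cs[i]'hilen) := by
    rw [hsub, List.getElem?_take, if_pos (by omega), List.getElem?_drop, Nat.add_zero,
      List.getElem?_eq_getElem hilen]
  have h0 : ∀ (h : 0 < (sub.map pvConv).length),
      PySem.Chars.isupper ((sub.map pvConv)[0]'h) = true := by
    intro h
    have h0l : 0 < sub.length := by simpa using h
    have hv : sub[0]'h0l = cs[i]'hilen := by
      have := List.getElem?_eq_getElem h0l
      rw [hsub0] at this
      exact (Option.some.inj this).symm
    rw [List.getElem_map, hv, pvConv, if_neg (pvUpper_ne_newline _ hcu)]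
    exact hcu
  rw [pvTempEq sub]
  have hmark := pvMark_go (sub.map pvConv) h0 (((sub.map pvConv).map pvSing).length) 0
    (by simp)
  simp only [List.take_zero, List.drop_zero, List.nil_append] at hmark
  rw [hmark, pvDelLoop_eq (pvSpec (sub.map pvConv)).length _ 0 (by omega)]
  simp only [List.take_zero, List.drop_zero, List.nil_append]
  rw [pvFilter_pvSpec, pvCleanB_eq, pvSpecFB_eq]
  have hmapsing : List.map pvSing (pvSpecFA (List.map pvConv sub))
      = List.map (fun c => [c]) (pvSpecFA (List.map pvConv sub)) := rfl
  rw [hmapsing, PySem.Chars.join_nil_singletons]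

-- ---- findTerm / nextTerm correspondence ----

-- the fuel-free value of A's terminator search (cs.length - t fuel is always enough)
def pvFT (cs : List Char) (t : Nat) : Nat := pvFindTermA cs (cs.length - t) t

theorem pvFindTermA_of_ge (cs : List Char) (fuel t : Nat) (h : cs.length ≤ t) :
    pvFindTermA cs fuel t = t := by
  cases fuel with
  | zero => rfl
  | succ f =>
    rw [pvFindTermA, if_neg (by omega)]

theorem pvFT_step (cs : List Char) (t : Nat) (h1 : t < cs.length) :
    pvFT cs t = if cs.getD t ' ' ∈ pvTerm then t else pvFT cs (t + 1) := by
  rw [pvFT, show cs.length - t = (cs.length - (t + 1)) + 1 from by omega, pvFindTermA,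
    if_pos h1]
  rfl

theorem pvFT_of_ge (cs : List Char) (t : Nat) (h : cs.length ≤ t) : pvFT cs t = t :=
  pvFindTermA_of_ge cs _ t h

theorem le_pvFindTermA (cs : List Char) :
    ∀ (fuel t : Nat), t ≤ pvFindTermA cs fuel t := by
  intro fuel
  induction fuel with
  | zero => intro t; exact le_refl t
  | succ f ih =>
    intro t
    rw [pvFindTermA]
    split_ifs with h1 h2
    · exact le_refl t
    · exact le_trans (Nat.le_succ t) (ih (t + 1))
    · exact le_refl t

theorem le_pvFT (cs : List Char) (t : Nat) : t ≤ pvFT cs t := le_pvFindTermA cs _ t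

theorem pvFT_le_len (cs : List Char) (t : Nat) (h : t ≤ cs.length) : pvFT cs t ≤ cs.length := by
  rcases Nat.lt_or_ge t cs.length with hlt | hge
  · rw [pvFT_step cs t hlt]
    split_ifs with hmem
    · omega
    · exact pvFT_le_len cs (t + 1) (by omega)
  · rw [pvFT_of_ge cs t (by omega)]
    omega
termination_by cs.length - t

theorem pvFT_term (cs : List Char) (t : Nat) (ht : t ≤ cs.length)
    (h : pvFT cs t < cs.length) : cs.getD (pvFT cs t) ' ' ∈ pvTerm := by
  rcases Nat.lt_or_ge t cs.length with hlt | hge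
  · rw [pvFT_step cs t hlt] at h ⊢
    split_ifs at h ⊢ with hmem
    · exact hmem
    · exact pvFT_term cs (t + 1) (by omega) h
  · rw [pvFT_of_ge cs t (by omega)] at h
    omega
termination_by cs.length - t

theorem pvFT_not_term (cs : List Char) (t : Nat) (h1 : t < cs.length)
    (h2 : cs.getD t ' ' ∉ pvTerm) : pvFT cs t = pvFT cs (t + 1) := by
  rw [pvFT_step cs t h1, if_neg h2]

theorem pvNextTerm_eq (cs : List Char) :
    ∀ (fuel t : Nat), cs.length ≤ t + fuel →
    pvNextTerm cs fuel t = if pvFT cs t < cs.length then some (pvFT cs t) else none := by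
  intro fuel
  induction fuel with
  | zero =>
    intro t h
    rw [pvNextTerm, pvFT_of_ge cs t (by omega), if_neg (by omega)]
  | succ f ih =>
    intro t h
    by_cases hlt : t < cs.length
    · rw [pvNextTerm, if_pos hlt, pvFT_step cs t hlt]
      by_cases hmem : cs.getD t ' ' ∈ pvTerm
      · rw [if_pos hmem, if_pos hmem, if_pos (by omega)]
      · rw [if_neg hmem, if_neg hmem, ih (t + 1) (by omega)]
    · rw [pvNextTerm, if_neg hlt, pvFT_of_ge cs t (by omega), if_neg (by omega)]

-- ---- when no terminator remains, A's loop returns its accumulator ----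

theorem pvLoopA_noTerm (cs : List Char) :
    ∀ (fuel i : Nat) (res : List (List String)),
    pvFT cs i = cs.length → pvLoopA cs fuel i res = res := by
  intro fuel
  induction fuel with
  | zero => intro i res _; rfl
  | succ fuel ih =>
    intro i res h
    rw [pvLoopA]
    by_cases hlt : i < cs.length
    · have hnt : cs.getD i ' ' ∉ pvTerm := by
        intro hmem
        rw [pvFT_step cs i hlt, if_pos hmem] at h
        omega
      have hnext : pvFT cs (i + 1) = cs.length := by
        rw [← pvFT_not_term cs i hlt hnt]
        exact h
      have hfa : pvFindTermA cs (cs.length - i) i = cs.length := h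
      rw [if_pos hlt]
      split_ifs with hb hg
      · exact ih (i + 1) res hnext
      · exfalso
        rw [hfa] at hg
        exact absurd hg.1 (lt_irrefl _)
      · exact ih (i + 1) res hnext
    · rw [if_neg hlt]

-- ---- main loop correspondence ----

theorem pvLoopAB (cs : List Char) :
    ∀ (fuel i : Nat) (res : List (List String)),
    pvLoopA cs fuel i res = pvLoopB cs fuel i res := by
  intro fuel
  induction fuel with
  | zero => intro i res; rfl
  | succ fuel ih =>
    intro i res
    rw [pvLoopA, pvLoopB]
    by_cases hlt : i < cs.length
    · rw [if_pos hlt, if_pos hlt]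
      have hup : PySem.Chars.isupper (cs.getD i ' ') = true ↔
          ('A' ≤ cs.getD i ' ' ∧ cs.getD i ' ' ≤ 'Z') := by
        simp [PySem.Chars.isupper]
      cases hb : PySem.Chars.isupper (cs.getD i ' ') with
      | true =>
        rw [if_neg (by simp), if_pos (hup.mp hb)]
        have hnotterm : cs.getD i ' ' ∉ pvTerm := pvUpper_not_term _ hb
        have hfa : pvFT cs i = pvFT cs (i + 1) := pvFT_not_term cs i hlt hnotterm
        have hgt : i < pvFT cs i := by
          rw [hfa]
          have := le_pvFT cs (i + 1)
          omega
        have hcast : pvFindTermA cs (cs.length - i) i = pvFT cs i := rfl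
        rw [hcast]
        have hnt : pvNextTerm cs (cs.length - i) i
            = if pvFT cs i < cs.length then some (pvFT cs i) else none :=
          pvNextTerm_eq cs (cs.length - i) i (by omega)
        by_cases hend : pvFT cs i < cs.length
        · rw [if_pos ⟨hend, pvFT_term cs i (by omega) hend⟩]
          rw [pvSentence_eq cs i (pvFT cs i) hgt (by omega) hb]
          rw [hnt, if_pos hend]
          exact ih (pvFT cs i + 1) (res ++ [pvSentenceB cs i (pvFT cs i)])
        · rw [if_neg (fun hc => hend hc.1)]
          rw [hnt, if_neg hend]
          have heq : pvFT cs i = cs.length := by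
            have := pvFT_le_len cs i (by omega)
            omega
          rw [hfa] at heq
          exact pvLoopA_noTerm cs fuel (i + 1) res heq
      | false =>
        rw [if_pos (by simp), if_neg (fun hc => by rw [hup.mpr hc] at hb; cases hb)]
        exact ih (i + 1) res
    · rw [if_neg hlt, if_neg hlt]

-- ===== VERDICT (by name: the statement is the Claim_ definition above) =====
theorem split_by_sentence_spec : Claim_equal_split_by_sentence := by
  intro text _
  unfold Spec_split_by_sentence split_by_sentence split_by_sentence_alt
  exact pvLoopAB text.toList (text.toList.length + 1) 0 []
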